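-- pv_equiv track=rewrite | github.com/Arron-chenzm/common_test_new | analysis/bg1_analysis.py | bg1_thing
-- ===== SOURCE A (Python) =====
-- def bg1_thing(str):
--     res = ""
--     length = len(str)
--     flag = 0
--     for i in range(0, length):
--         if str[i] != ":":
--             continue
--         elif str[i] == ":" and flag < 2:
--             flag = flag+1
--             continue
--         elif str[i] == ":" and flag == 2:
--             while (i<length-2):
--                 i = i + 1
--                 res = res + str[i]
--             break
--     return res
-- ===== SOURCE B (Python) =====
-- def bg1_thing(str):
--     parts = str.split(":", 3)
--     if len(parts) < 4:
--         return ""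
--     return parts[3][:-1]
-- ===== Notes on version B (the rewrite author's own statement) =====
-- stated objective: simpler
-- what changed: Replaced the char-indexed scan with a flag counter plus an inner char-by-char accumulation loop by a single maxsplit-3 split on the colon separator followed by one slice of the fourth part.
import Mathlib
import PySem

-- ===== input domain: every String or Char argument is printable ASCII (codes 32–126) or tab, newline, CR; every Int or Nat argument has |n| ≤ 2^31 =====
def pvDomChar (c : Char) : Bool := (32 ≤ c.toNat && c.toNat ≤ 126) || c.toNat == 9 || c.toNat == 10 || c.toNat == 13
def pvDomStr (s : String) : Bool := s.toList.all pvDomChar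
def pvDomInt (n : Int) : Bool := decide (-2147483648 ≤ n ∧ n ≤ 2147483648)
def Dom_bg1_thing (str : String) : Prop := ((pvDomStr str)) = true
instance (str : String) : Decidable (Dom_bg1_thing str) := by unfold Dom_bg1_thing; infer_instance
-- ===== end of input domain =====

-- B replaces A's flag-counting scan with its inner char-by-char copy loop by one maxsplit-3 split plus one slice (simpler; a timing run measured it faster by a constant factor).

-- ===== PORT A =====
-- inner `while (i < length-2): i += 1; res += str[i]`; Nat subtraction agrees with
-- Python's `length-2` here because the loop test is false in both when length ≤ 2 and i ≥ 0.
def bg1InnerA (cs : List Char) (len i : Nat) (res : List Char) : List Char :=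
  if i < len - 2 then bg1InnerA cs len (i + 1) (res ++ [cs.getD (i + 1) ' ']) else res
  termination_by len - 2 - i

-- outer `for i in range(0, length)` with the `break` (which ends the function, returning res)
def bg1OuterA (cs : List Char) (len : Nat) (flag : Nat) (res : List Char) (i : Nat) : List Char :=
  if i < len then
    if cs.getD i ' ' ≠ ':' then bg1OuterA cs len flag res (i + 1)
    else if flag < 2 then bg1OuterA cs len (flag + 1) res (i + 1)
    else bg1InnerA cs len i res
  else res
  termination_by len - i

def bg1_thing (str : String) : String :=
  String.ofList (bg1OuterA str.toList str.toList.length 0 [] 0)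

-- ===== PORT B =====
def bg1_thing_alt (str : String) : String :=
  let parts := (PySem.Str.splitMax? str ":" 3).getD []   -- sep ":" ≠ "", so never none
  if parts.length < 4 then ""
  else PySem.Str.slice (PySem.List.pyGetD parts 3 "") none (some (-1))

-- ===== PRECONDITION & SPEC =====
def Spec_bg1_thing (str : String) (out : String) : Prop := out = bg1_thing_alt str
instance (str : String) (out : String) : Decidable (Spec_bg1_thing str out) := by unfold Spec_bg1_thing; infer_instance

-- ===== CLAIM (what is proved, stated in full; the proofs are below) =====
def Claim_equal_bg1_thing : Prop := ∀ (str : String), Dom_bg1_thing str → Spec_bg1_thing str (bg1_thing str)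

-- ===== LEMMAS AND PROOFS =====

-- common specification: skip k colons, then return the rest minus the last char
def bg1Spec (cs : List Char) (k : Nat) : List Char :=
  match cs with
  | [] => []
  | c :: rest =>
    if c = ':' then (if k = 0 then rest.dropLast else bg1Spec rest (k - 1))
    else bg1Spec rest k

-- pure form of PySem.Chars.splitOnMax for sep = ":"
def bg1Parts (l : List Char) (m : Nat) : List (List Char) :=
  match l with
  | [] => [[]]
  | c :: rest =>
    if m = 0 then [c :: rest]
    else if c = ':' then [] :: bg1Parts rest (m - 1)
    else (bg1Parts rest m).modifyHead (c :: ·)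

theorem bg1Parts_ne_nil (l : List Char) (m : Nat) : bg1Parts l m ≠ [] := by
  cases l with
  | nil => simp [bg1Parts]
  | cons c rest =>
    simp only [bg1Parts]
    split_ifs <;> simp [List.modifyHead_eq_nil_iff, bg1Parts_ne_nil]

theorem bg1Parts_zero (l : List Char) : bg1Parts l 0 = [l] := by
  cases l <;> simp [bg1Parts]

theorem bg1_inner_eq (cs : List Char) (len i : Nat) (res : List Char)
    (hlen : len = cs.length) :
    bg1InnerA cs len i res = res ++ (cs.drop (i + 1)).take (len - 2 - i) := by
  rw [bg1InnerA]
  split_ifs with h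
  · rw [bg1_inner_eq cs len (i + 1) _ hlen]
    have hi1 : i + 1 < cs.length := by omega
    have : (cs.drop (i + 1)).take (len - 2 - i)
        = cs[i + 1] :: (cs.drop (i + 2)).take (len - 2 - (i + 1)) := by
      rw [List.drop_eq_getElem_cons hi1]
      have : len - 2 - i = (len - 2 - (i + 1)) + 1 := by omega
      rw [this, List.take_succ_cons]
    rw [this, List.getD_eq_getElem cs ' ' hi1, List.append_assoc]
    rfl
  · have : len - 2 - i = 0 := by omega
    simp [this]
  termination_by len - 2 - i

theorem bg1_outer_eq (cs : List Char) (len flag : Nat) (res : List Char) (i : Nat)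
    (hlen : len = cs.length) (hf : flag ≤ 2) :
    bg1OuterA cs len flag res i = res ++ bg1Spec (cs.drop i) (2 - flag) := by
  rw [bg1OuterA]
  split_ifs with h hc hfl
  · -- cs[i] ≠ ':'
    rw [bg1_outer_eq cs len flag res (i + 1) hlen hf]
    have hi : i < cs.length := by omega
    rw [List.drop_eq_getElem_cons hi, bg1Spec]
    rw [List.getD_eq_getElem cs ' ' hi] at hc
    simp [hc]
  · -- colon, flag < 2
    rw [bg1_outer_eq cs len (flag + 1) res (i + 1) hlen (by omega)]
    have hi : i < cs.length := by omega
    rw [List.drop_eq_getElem_cons hi, bg1Spec]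
    rw [List.getD_eq_getElem cs ' ' hi] at hc
    simp only [not_not] at hc
    have h2 : ¬ (2 - flag = 0) := by omega
    have h3 : 2 - flag - 1 = 2 - (flag + 1) := by omega
    simp [hc, h2, h3]
  · -- colon, flag = 2
    rw [bg1_inner_eq cs len i res hlen]
    have hi : i < cs.length := by omega
    rw [List.drop_eq_getElem_cons hi, bg1Spec]
    rw [List.getD_eq_getElem cs ' ' hi] at hc
    simp only [not_not] at hc
    have hfl2 : flag = 2 := by omega
    have hdl : (cs.drop (i + 1)).dropLast = (cs.drop (i + 1)).take (len - 2 - i) := by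
      rw [List.dropLast_eq_take, List.length_drop]
      congr 1
      omega
    simp [hc, hfl2, hdl]
  · simp [List.drop_eq_nil_of_le (by omega : cs.length ≤ i), bg1Spec]
  termination_by len - i

theorem bg1_go_eq (fuel : Nat) (m : Nat) (l cur : List Char) (acc : List (List Char))
    (hfuel : l.length < fuel) :
    PySem.Chars.splitOnMax.go [':'] fuel m l cur acc
      = acc.reverse ++ (bg1Parts l m).modifyHead (cur.reverse ++ ·) := by
  match fuel, l with
  | fuel + 1, [] =>
    simp [PySem.Chars.splitOnMax.go, bg1Parts]
  | fuel + 1, c :: rest =>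
    rw [PySem.Chars.splitOnMax.go]
    by_cases hm : m = 0
    · simp [hm, bg1Parts]
    · simp only [hm, if_false]
      by_cases hc : c = ':'
      · have hpre : [':'].isPrefixOf (c :: rest) = true := by simp [hc, List.isPrefixOf]
        rw [hpre]
        simp only [if_true]
        rw [show List.drop [':'].length (c :: rest) = rest from rfl]
        rw [bg1_go_eq fuel (m - 1) rest [] (cur.reverse :: acc) (by simpa using hfuel)]
        simp [bg1Parts, hm, hc]
        cases hP : bg1Parts rest (m - 1) with
        | nil => exact absurd hP (bg1Parts_ne_nil rest (m - 1))
        | cons p ps => simp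
      · have hpre : [':'].isPrefixOf (c :: rest) = false := by
          simp only [List.isPrefixOf]
          simp [Ne.symm hc]
        rw [hpre]
        simp only [Bool.false_eq_true, if_false]
        rw [bg1_go_eq fuel m rest (c :: cur) acc (by simpa using hfuel)]
        simp only [bg1Parts, hm, if_false, hc]
        congr 1
        cases hP : bg1Parts rest m with
        | nil => exact absurd hP (bg1Parts_ne_nil rest m)
        | cons p ps => simp

theorem bg1_splitOnMax_eq (cs : List Char) :
    PySem.Chars.splitOnMax cs [':'] 3 = bg1Parts cs 3 := by
  rw [PySem.Chars.splitOnMax]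
  simp only [show ¬((3 : Int) < 0) by decide, if_false]
  rw [show ((3 : Int).toNat) = 3 from rfl]
  rw [bg1_go_eq (cs.length + 1) 3 cs [] [] (by omega)]
  cases hP : bg1Parts cs 3 with
  | nil => exact absurd hP (bg1Parts_ne_nil cs 3)
  | cons p ps => simp

theorem bg1_parts_spec (cs : List Char) (k : Nat) :
    (if (bg1Parts cs (k + 1)).length < k + 2 then []
     else ((bg1Parts cs (k + 1)).getD (k + 1) []).dropLast) = bg1Spec cs k := by
  induction cs generalizing k with
  | nil => simp [bg1Parts, bg1Spec]
  | cons c rest ih =>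
    simp only [bg1Parts, Nat.succ_ne_zero, if_false]
    by_cases hc : c = ':'
    · cases k with
      | zero =>
        simp only [hc, if_true, Nat.sub_self, bg1Parts_zero, bg1Spec]
        simp
      | succ k' =>
        simp only [hc, if_true, Nat.add_sub_cancel, bg1Spec]
        have := ih k'
        simpa [List.getD] using this
    · simp only [hc, if_false, bg1Spec]
      have hlen : ((bg1Parts rest (k + 1)).modifyHead (c :: ·)).length
          = (bg1Parts rest (k + 1)).length := by simp
      have hget : ((bg1Parts rest (k + 1)).modifyHead (c :: ·)).getD (k + 1) []
          = (bg1Parts rest (k + 1)).getD (k + 1) [] := by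
        cases hP : bg1Parts rest (k + 1) with
        | nil => exact absurd hP (bg1Parts_ne_nil rest (k + 1))
        | cons p ps => simp [List.getD]
      rw [hlen, hget, ih k]

-- ===== VERDICT (by name: the statement is the Claim_ definition above) =====
theorem bg1_thing_spec : Claim_equal_bg1_thing := by
  intro str _
  unfold Spec_bg1_thing bg1_thing bg1_thing_alt
  rw [bg1_outer_eq str.toList str.toList.length 0 [] 0 rfl (by omega)]
  simp only [List.drop_zero, List.nil_append]
  rw [PySem.Str.splitMax?]
  have hsep : (":" : String).toList = [':'] := rfl
  rw [hsep]
  rw [PySem.Chars.splitMax?]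
  simp only [List.isEmpty_cons, Bool.false_eq_true, if_false, Option.map_some, Option.getD_some]
  rw [bg1_splitOnMax_eq]
  rw [← bg1_parts_spec str.toList 2]
  by_cases h : (bg1Parts str.toList (2 + 1)).length < 2 + 2
  · simp only [List.length_map]
    simp [h]
  · have h3 : 3 < (bg1Parts str.toList (2 + 1)).length := by omega
    simp only [List.length_map, show (2:Nat)+1 = 3 from rfl, show (2:Nat)+2 = 4 from rfl] at *
    simp only [h, if_false]
    have hget : PySem.List.pyGetD ((bg1Parts str.toList 3).map String.ofList) 3 ""
        = String.ofList (bg1Parts str.toList 3)[3] := by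
      simp [PySem.List.pyGetD, PySem.List.pyGet?, PySem.List.pyIdx?,
        show ((3 : Int).toNat) = 3 from rfl, h3]
    rw [hget, PySem.Str.slice]
    rw [String.toList_ofList,
      show PySem.Chars.slice (bg1Parts str.toList 3)[3] none (some (-1))
        = (bg1Parts str.toList 3)[3].dropLast from PySem.List.slice_to_neg_one _]
    rw [List.getD_eq_getElem _ _ h3]
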